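-- pv_equiv track=rewrite | github.com/abuchi247/datastructures | general/incrementNumberBy1.py | increment_digit
-- ===== SOURCE A (Python) =====
-- def increment_digit(original_numbers):
--     allowed_digits = ['A', 'B', 'C', 'D']    # Allowed digits
--     # check if the digits are valid
--     for digit in original_numbers:
--         # ensure the digits are valid
--         if digit is None:
--             return None
--
--         if digit not in allowed_digits:
--             return None
--
--     increased_number = original_numbers[:]
--
--     current_index = len(original_numbers) - 1
--
--     increment_complete = False
--
--     while current_index >= 0 and not increment_complete:
--         current_digit = original_numbers[current_index]   # gets the current character
--
--         index_current_digit = allowed_digits.index(current_digit)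
--
--         index_of_next_digit = (index_current_digit + 1) % len(allowed_digits)   # get the next index
--
--         # update the old value
--         increased_number[current_index] = allowed_digits[index_of_next_digit]
--
--         if index_of_next_digit != 0:    # no carry over happening
--             increment_complete = True
--
--         # if we are the most significate digit and it wraps around. Just like 9 + 1 = 10
--         if current_index == 0 and index_of_next_digit == 0:
--             increased_number.insert(0, allowed_digits[0]) # in the case of DDD + 1 => AAAA
--
--         current_index -= 1
--
--     return increased_number
-- ===== SOURCE B (Python) =====
-- def increment_digit(original_numbers):
--     allowed_digits = ['A', 'B', 'C', 'D']
--     for digit in original_numbers: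
--         if digit is None:
--             return None
--         if digit not in allowed_digits:
--             return None
--     if not original_numbers:
--         return []
--     # rightmost digit that is not 'D' gets its successor; everything right of it resets to 'A'
--     for i in range(len(original_numbers) - 1, -1, -1):
--         d = original_numbers[i]
--         if d != 'D':
--             return (original_numbers[:i]
--                     + [allowed_digits[allowed_digits.index(d) + 1]]
--                     + ['A'] * (len(original_numbers) - 1 - i))
--     # all digits are 'D': wrap to all-'A' one digit longer
--     return ['A'] * (len(original_numbers) + 1)
-- ===== Notes on version B (the rewrite author's own statement) =====
-- stated objective: simpler
-- what changed: B replaces A's right-to-left carry loop that mutates a copied list digit by digit with a single search for the rightmost non-'D' digit followed by a direct construction (prefix + incremented digit + trailing 'A's, or all-'A' of length+1 on full wrap).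
import Mathlib
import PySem

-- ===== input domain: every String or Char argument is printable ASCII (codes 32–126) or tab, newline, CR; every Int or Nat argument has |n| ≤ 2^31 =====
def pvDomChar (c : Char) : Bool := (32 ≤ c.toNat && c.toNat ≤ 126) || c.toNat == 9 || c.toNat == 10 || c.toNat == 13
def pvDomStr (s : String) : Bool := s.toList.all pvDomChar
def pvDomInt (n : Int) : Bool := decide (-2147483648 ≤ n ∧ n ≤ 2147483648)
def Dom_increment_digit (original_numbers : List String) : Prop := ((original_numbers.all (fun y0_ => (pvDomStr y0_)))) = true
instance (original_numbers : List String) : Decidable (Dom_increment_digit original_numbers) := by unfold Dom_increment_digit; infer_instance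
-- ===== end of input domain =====

-- B replaces A's digit-by-digit carry loop (mutating a copy while carrying) by a single search for
-- the rightmost non-'D' digit and a direct construction of the result; same cost, plainer decomposition.

-- ===== PORT A =====
def pvAllowed : List String := ["A", "B", "C", "D"]

-- the while-loop of A: i = current_index (the loop runs while i ≥ 0 and not increment_complete)
def pvLoopA (orig : List String) (i : Nat) (inc : List String) : List String :=
  let current_digit := orig.getD i ""                                   -- orig[i]; i is in range whenever called
  let index_current_digit := (PySem.List.index? pvAllowed current_digit).getD 0  -- in range after validation
  let index_of_next_digit := (index_current_digit + 1) % 4              -- len(allowed_digits) = 4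
  let inc' := inc.set i (pvAllowed.getD index_of_next_digit "")
  if index_of_next_digit ≠ 0 then inc'                                  -- increment_complete: loop exits
  else
    let inc'' := if i = 0 then "A" :: inc' else inc'                    -- insert(0, 'A') on full wrap
    match i with
    | 0 => inc''
    | j + 1 => pvLoopA orig j inc''

def increment_digit (original_numbers : List String) : Option (List String) :=
  if original_numbers.all (fun d => pvAllowed.contains d) then          -- the validation for-loop
    match original_numbers.length with
    | 0 => some original_numbers                                        -- loop body never runs
    | n + 1 => some (pvLoopA original_numbers n original_numbers)
  else none

-- ===== PORT B =====
def pvSucc (d : String) : String :=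
  pvAllowed.getD ((PySem.List.index? pvAllowed d).getD 0 + 1) ""

-- B's downward scan for the rightmost digit that is not 'D'
def pvLoopB (orig : List String) (i : Nat) : List String :=
  let d := orig.getD i ""
  if d ≠ "D" then
    orig.take i ++ [pvSucc d] ++ List.replicate (orig.length - 1 - i) "A"
  else
    match i with
    | 0 => List.replicate (orig.length + 1) "A"                         -- all digits are 'D'
    | j + 1 => pvLoopB orig j

def increment_digit_alt (original_numbers : List String) : Option (List String) :=
  if original_numbers.all (fun d => pvAllowed.contains d) then
    if original_numbers = [] then some []
    else some (pvLoopB original_numbers (original_numbers.length - 1))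
  else none

-- ===== PRECONDITION & SPEC =====
def Spec_increment_digit (original_numbers : List String) (out : Option (List String)) : Prop := out = increment_digit_alt original_numbers
instance (original_numbers : List String) (out : Option (List String)) : Decidable (Spec_increment_digit original_numbers out) := by unfold Spec_increment_digit; infer_instance

-- ===== CLAIM (what is proved, stated in full; the proofs are below) =====
def Claim_equal_increment_digit : Prop := ∀ (original_numbers : List String), Dom_increment_digit original_numbers → Spec_increment_digit original_numbers (increment_digit original_numbers)

-- ===== LEMMAS AND PROOFS =====

lemma pv_take_set (l : List String) (i : Nat) (hi : i < l.length) (x : String) (t : List String) :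
    ((l.take (i + 1)) ++ t).set i x = l.take i ++ x :: t := by
  have h1 : l.take (i + 1) = l.take i ++ [l[i]] := List.take_succ_eq_append_getElem hi
  have h2 : (l.take i).length = i := List.length_take_of_le (by omega)
  rw [h1, List.append_assoc, List.set_append_right _ _ (by omega), h2]
  simp

-- one completed (non-carrying) step of A's loop equals B's construction at the same index
lemma pv_case_nonD (orig : List String) (i : Nat) (hi : i < orig.length) (c : String)
    (hc : orig[i] = c) (hD : c ≠ "D")
    (h1 : ((PySem.List.index? pvAllowed c).getD 0 + 1) % 4 ≠ 0)
    (h23 : (pvAllowed[((PySem.List.index? pvAllowed c).getD 0 + 1) % 4]?.getD "" : String) = pvSucc c) :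
    pvLoopA orig i (orig.take (i + 1) ++ List.replicate (orig.length - 1 - i) "A")
      = pvLoopB orig i := by
  have hsome : orig[i]? = some c := by rw [List.getElem?_eq_getElem hi, hc]
  cases i <;>
  · rw [pvLoopA, pvLoopB]
    simp only [List.getD_eq_getElem?_getD, hsome, Option.getD_some]
    rw [if_pos h1, if_pos hD, h23, pv_take_set _ _ hi]
    simp

lemma pv_loop_eq (orig : List String) (h : ∀ d ∈ orig, pvAllowed.contains d) :
    ∀ i, i < orig.length →
      pvLoopA orig i (orig.take (i + 1) ++ List.replicate (orig.length - 1 - i) "A")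
        = pvLoopB orig i := by
  intro i
  induction i with
  | zero =>
    intro hi
    have hc := h orig[0] (List.getElem_mem hi)
    simp only [pvAllowed, List.contains_eq_mem, List.mem_cons, decide_eq_true_eq,
      List.not_mem_nil, or_false] at hc
    rcases hc with hc | hc | hc | hc
    · exact pv_case_nonD orig 0 hi "A" hc (by decide) (by decide) (by decide)
    · exact pv_case_nonD orig 0 hi "B" hc (by decide) (by decide) (by decide)
    · exact pv_case_nonD orig 0 hi "C" hc (by decide) (by decide) (by decide)
    · -- orig[0] = "D": full wrap, prepend "A"
      have hsome : orig[0]? = some "D" := by rw [List.getElem?_eq_getElem hi, hc]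
      have h1 : (((PySem.List.index? pvAllowed "D").getD 0 + 1) % 4 : Nat) = 0 := by decide
      rw [pvLoopA, pvLoopB]
      simp only [List.getD_eq_getElem?_getD, hsome, Option.getD_some, h1]
      rw [pv_take_set _ _ hi]
      have hrep : ("A" : String) :: "A" :: List.replicate (orig.length - 1) "A"
          = List.replicate (orig.length + 1) "A" := by
        rw [show orig.length + 1 = (orig.length - 1) + 1 + 1 by omega]
        simp [List.replicate_succ]
      simp only [pvAllowed]
      simpa using hrep
  | succ j ih =>
    intro hi
    have hc := h orig[j + 1] (List.getElem_mem hi)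
    simp only [pvAllowed, List.contains_eq_mem, List.mem_cons, decide_eq_true_eq,
      List.not_mem_nil, or_false] at hc
    rcases hc with hc | hc | hc | hc
    · exact pv_case_nonD orig (j + 1) hi "A" hc (by decide) (by decide) (by decide)
    · exact pv_case_nonD orig (j + 1) hi "B" hc (by decide) (by decide) (by decide)
    · exact pv_case_nonD orig (j + 1) hi "C" hc (by decide) (by decide) (by decide)
    · -- orig[j+1] = "D": one carry step, then the inductive hypothesis
      have hsome : orig[j + 1]? = some "D" := by rw [List.getElem?_eq_getElem hi, hc]
      have h1 : (((PySem.List.index? pvAllowed "D").getD 0 + 1) % 4 : Nat) = 0 := by decide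
      have hrep : ("A" : String) :: List.replicate (orig.length - 1 - (j + 1)) "A"
          = List.replicate (orig.length - 1 - j) "A" := by
        rw [show orig.length - 1 - j = (orig.length - 1 - (j + 1)) + 1 by omega]
        rfl
      rw [pvLoopA, pvLoopB]
      simp only [List.getD_eq_getElem?_getD, hsome, Option.getD_some, h1]
      rw [pv_take_set _ _ hi]
      simp only [pvAllowed]
      rw [show (["A", "B", "C", "D"][(0 : Nat)]?.getD "" : String) = "A" from rfl, hrep]
      simpa using ih (by omega)

-- ===== VERDICT (by name: the statement is the Claim_ definition above) =====
theorem increment_digit_spec : Claim_equal_increment_digit := by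
  intro orig _
  unfold Spec_increment_digit increment_digit increment_digit_alt
  by_cases hv : orig.all (fun d => pvAllowed.contains d)
  · rw [if_pos hv, if_pos hv]
    cases orig with
    | nil => rfl
    | cons x xs =>
      rw [if_neg (by simp)]
      show some (pvLoopA (x :: xs) xs.length (x :: xs)) = some (pvLoopB (x :: xs) xs.length)
      have h := pv_loop_eq (x :: xs)
        (fun d hd => List.all_eq_true.mp hv d hd) xs.length (by simp)
      have hinit : (x :: xs).take (xs.length + 1)
          ++ List.replicate ((x :: xs).length - 1 - xs.length) "A" = x :: xs := by simp
      rw [hinit] at h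
      rw [h]
  · rw [if_neg hv, if_neg hv]
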